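-- pv_equiv track=rewrite | github.com/andbis/genderGap | library.py | count
-- ===== SOURCE A (Python) =====
-- def count(labels):
--     #counting the frequency of a list
--     dic = {}
--     classes = set(labels)
--     for i in classes:
--         dic[i] = 0
--         for j in labels:
--             if int(i) == int(j):
--                 dic[i] += 1
--     return dic
-- ===== SOURCE B (Python) =====
-- def count(labels):
--     # One accumulating pass builds int(label) -> frequency, then one lookup pass
--     # over the distinct labels; replaces A's per-class rescans of the whole list.
--     freq = {}
--     for j in labels:
--         k = int(j)
--         freq[k] = freq.get(k, 0) + 1
--     return {i: freq.get(int(i), 0) for i in set(labels)}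
-- ===== Notes on version B (the rewrite author's own statement) =====
-- stated objective: faster
-- what changed: Replaces A's nested loop (a full rescan of labels for every distinct class) with a single accumulating frequency pass over labels followed by one lookup per distinct label.
import Mathlib
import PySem

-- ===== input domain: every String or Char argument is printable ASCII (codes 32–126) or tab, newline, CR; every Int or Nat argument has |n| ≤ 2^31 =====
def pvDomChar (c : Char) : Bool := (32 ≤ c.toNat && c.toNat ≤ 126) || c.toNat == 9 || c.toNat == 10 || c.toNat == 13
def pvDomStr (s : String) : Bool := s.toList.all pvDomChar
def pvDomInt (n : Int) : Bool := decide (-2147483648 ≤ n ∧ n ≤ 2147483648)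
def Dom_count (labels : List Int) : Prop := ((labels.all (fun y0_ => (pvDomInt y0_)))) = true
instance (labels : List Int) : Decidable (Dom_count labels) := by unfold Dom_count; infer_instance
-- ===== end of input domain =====

-- B replaces A's per-class rescan of labels with one accumulating frequency pass
-- plus one lookup per distinct label (faster: O(k*n) -> O(n) dict operations aside).


-- ===== PORT A =====
-- dic = {}; for i in set(labels): dic[i] = 0; for j in labels: if int(i) == int(j): dic[i] += 1
-- (int() applied to an int is the identity, so 'int(i) == int(j)' is 'i == j' here)
def count (labels : List Int) : List (Int × Int) :=
  (List.foldl
    (fun dic i =>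
      List.foldl (fun d j => if i == j then d.modify i 0 (· + 1) else d)
        (dic.insert i 0) labels)
    PySem.Dict.empty (PySem.Set.ofList labels)).items

-- ===== PORT B =====
-- freq = {}; for j in labels: freq[int(j)] = freq.get(int(j), 0) + 1
-- return {i: freq.get(int(i), 0) for i in set(labels)}
def count_alt (labels : List Int) : List (Int × Int) :=
  let freq := List.foldl (fun d j => d.insert j (d.getD j 0 + 1)) PySem.Dict.empty labels
  (PySem.Set.ofList labels).map (fun i => (i, freq.getD i 0))

-- ===== PRECONDITION & SPEC =====
def Spec_count (labels : List Int) (out : List (Int × Int)) : Prop := out = count_alt labels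
instance (labels : List Int) (out : List (Int × Int)) : Decidable (Spec_count labels out) := by unfold Spec_count; infer_instance

-- ===== CLAIM (what is proved, stated in full; the proofs are below) =====
def Claim_equal_count : Prop := ∀ (labels : List Int), Dom_count labels → Spec_count labels (count labels)

-- ===== LEMMAS AND PROOFS =====

-- A's inner loop: with every key of `pre` different from i, it only touches the
-- final (i, c) entry and adds labels.count i to it.
theorem count_inner (ls : List Int) (pre : List (Int × Int)) (i : Int) (c : Int)
    (h : ∀ p ∈ pre, p.1 ≠ i) :
    List.foldl (fun d j => if i == j then PySem.Dict.modify d i 0 (· + 1) else d)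
      ⟨pre ++ [(i, c)]⟩ ls
    = ⟨pre ++ [(i, c + (ls.count i : Int))]⟩ := by
  induction ls generalizing c with
  | nil => simp
  | cons j ls ih =>
    by_cases hij : i = j
    · subst hij
      have hmod : PySem.Dict.modify (⟨pre ++ [(i, c)]⟩ : PySem.Dict Int Int) i 0 (· + 1)
          = ⟨pre ++ [(i, c + 1)]⟩ := by
        have hfind : List.find? (fun p => p.1 == i) (pre ++ [(i, c)]) = some (i, c) := by
          rw [List.find?_append]
          have : List.find? (fun p => p.1 == i) pre = none := by
            rw [List.find?_eq_none]
            intro p hp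
            simpa using h p hp
          simp [this]
        have hcont : (⟨pre ++ [(i, c)]⟩ : PySem.Dict Int Int).contains i = true := by
          simp [PySem.Dict.contains]
        simp only [PySem.Dict.modify, PySem.Dict.getD, PySem.Dict.get?, hfind,
          PySem.Dict.insert, hcont, if_pos]
        congr 1
        rw [List.map_append]
        congr 1
        · conv_rhs => rw [← List.map_id pre]
          apply List.map_congr_left
          intro p hp
          have := h p hp
          simp [this]
        · simp
      simp only [List.foldl_cons, BEq.rfl, if_pos, hmod]
      rw [ih (c + 1)]
      simp only [List.count_cons, BEq.rfl, if_pos]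
      congr 2
      push_cast
      ring_nf
    · have hne : (i == j) = false := by simp [hij]
      simp only [List.foldl_cons, hne, if_neg, Bool.false_eq_true, not_false_iff]
      rw [ih c, List.count_cons]
      simp [Ne.symm hij]

-- A's outer loop over a nodup class list, starting from an accumulator whose keys
-- avoid the remaining classes, appends one (i, labels.count i) entry per class.
theorem count_outer (labels : List Int) (cs : List Int) (acc : List (Int × Int))
    (hnd : cs.Nodup) (hdisj : ∀ p ∈ acc, p.1 ∉ cs) :
    (List.foldl
      (fun dic i =>
        List.foldl (fun d j => if i == j then PySem.Dict.modify d i 0 (· + 1) else d)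
          (dic.insert i 0) labels)
      ⟨acc⟩ cs).items
    = acc ++ cs.map (fun i => (i, (labels.count i : Int))) := by
  induction cs generalizing acc with
  | nil => simp
  | cons c cs ih =>
    have hkey : ∀ p ∈ acc, p.1 ≠ c := fun p hp => by
      have := hdisj p hp; simp at this; exact this.1
    have hins : (⟨acc⟩ : PySem.Dict Int Int).insert c 0 = ⟨acc ++ [(c, 0)]⟩ := by
      have hcont : (⟨acc⟩ : PySem.Dict Int Int).contains c = false := by
        simp only [PySem.Dict.contains, List.any_eq_false]
        intro p hp
        simpa using hkey p hp
      simp [PySem.Dict.insert, hcont]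
    simp only [List.foldl_cons, hins]
    rw [count_inner labels acc c 0 hkey]
    simp only [zero_add]
    have hdisj' : ∀ p ∈ acc ++ [(c, (labels.count c : Int))], p.1 ∉ cs := by
      intro p hp
      rcases List.mem_append.mp hp with hp | hp
      · have := hdisj p hp; simp at this; exact this.2
      · simp at hp; subst hp; exact (List.nodup_cons.mp hnd).1
    rw [ih (acc ++ [(c, (labels.count c : Int))]) (List.nodup_cons.mp hnd).2 hdisj']
    simp

-- B's frequency dict answers labels.count for every key.
theorem count_alt_eq (labels : List Int) :
    count_alt labels
    = (PySem.Set.ofList labels).map (fun i => (i, (labels.count i : Int))) := by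
  unfold count_alt
  apply List.map_congr_left
  intro i _
  have hfun : (fun (d : PySem.Dict Int Int) (j : Int) => d.insert j (d.getD j 0 + 1))
      = (fun d x => d.modify x 0 (· + 1)) := rfl
  rw [hfun, PySem.Dict.getD_foldl_modify_add_one]
  simp [PySem.Dict.getD, PySem.Dict.get?, PySem.Dict.empty]

-- ===== VERDICT (by name: the statement is the Claim_ definition above) =====
theorem count_spec : Claim_equal_count := by
  intro labels _
  unfold Spec_count count
  rw [count_alt_eq]
  have := count_outer labels (PySem.Set.ofList labels) []
    (PySem.Set.nodup_ofList labels) (by intro p hp; simp at hp)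
  simpa [PySem.Dict.empty] using this
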